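-- pv_equiv track=rewrite | github.com/Frunnze/AA_Laboratories | AA-lab-1-Fibonacci-sequence/fibonacci_algorithms.py | fast_double_fib
-- ===== SOURCE A (Python) =====
-- def fast_double_fib(index):
--     MOD = 10000000
--     if index == 0:
--         return (0, 1)
--     a, b = fast_double_fib(index // 2)
--     c = 2 * b - a
--     if c < 0:
--         c += MOD
--     c = (a * c) % MOD
--     d = (a * a + b * b) % MOD
--     if index % 2 == 0:
--         return (c, d)
--     else:
--         return (d, c + d)
-- ===== SOURCE B (Python) =====
-- def fast_double_fib(index):
--     # Iterative fast doubling: consume the bits of index MSB-first,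
--     # keeping (a, b) = (F(k), F(k+1)) for the prefix k read so far.
--     MOD = 10000000
--     a, b = 0, 1
--     if index > 0:
--         for ch in format(index, "b"):
--             c = a * (2 * b - a) % MOD
--             d = (a * a + b * b) % MOD
--             if ch == "1":
--                 a, b = d, c + d
--             else:
--                 a, b = c, d
--     return (a, b)
-- ===== Notes on version B (the rewrite author's own statement) =====
-- stated objective: alternative
-- what changed: Replaces A's halving recursion by an explicit iterative loop over the bits of index (MSB-first) with the fixup 'if c<0: c+=MOD' folded into Python's nonnegative % operator.
-- outside the precondition, e.g. on fast_double_fib(-1): A raises RecursionError, B returns (0, 1)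
import Mathlib
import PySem

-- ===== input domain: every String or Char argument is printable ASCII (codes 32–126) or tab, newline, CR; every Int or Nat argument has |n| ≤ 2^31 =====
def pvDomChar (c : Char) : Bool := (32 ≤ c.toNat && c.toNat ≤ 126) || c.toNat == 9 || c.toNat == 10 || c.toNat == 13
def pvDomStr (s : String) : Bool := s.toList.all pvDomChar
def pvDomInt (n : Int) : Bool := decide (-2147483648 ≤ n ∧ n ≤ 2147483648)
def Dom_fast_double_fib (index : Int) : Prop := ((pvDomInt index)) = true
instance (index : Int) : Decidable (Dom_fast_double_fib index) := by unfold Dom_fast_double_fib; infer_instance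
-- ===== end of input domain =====

-- B replaces A's halving recursion by an iterative MSB-first loop over the bits of index
-- (objective: alternative decomposition, same O(log n) cost).

-- ===== PORT A =====
-- Python A recurses on index // 2; for negative index it never reaches 0 (it raises
-- RecursionError), so the port guards index < 0 (a totality guard only; outside Pre_).
def fast_double_fib (index : Int) : Int × Int :=
  if index = 0 then (0, 1)
  else if _h : index < 0 then (0, 1)  -- Python diverges here; excluded by Pre_
  else
    let p := fast_double_fib (PySem.Int.floordiv index 2)
    let a := p.1
    let b := p.2
    let c0 := 2 * b - a
    let c1 := if c0 < 0 then c0 + 10000000 else c0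
    let c := PySem.Int.mod (a * c1) 10000000
    let d := PySem.Int.mod (a * a + b * b) 10000000
    if PySem.Int.mod index 2 = 0 then (c, d) else (d, c + d)
termination_by index.toNat
decreasing_by
  rw [PySem.Int.floordiv_eq_ediv_of_pos (by omega : (0:Int) < 2)]
  omega

-- ===== PORT B =====
-- one loop body of Source B (bit = current character of the binary string)
def fdStep (p : Int × Int) (bit : Bool) : Int × Int :=
  let a := p.1
  let b := p.2
  let c := PySem.Int.mod (a * (2 * b - a)) 10000000
  let d := PySem.Int.mod (a * a + b * b) 10000000
  if bit then (d, c + d) else (c, d)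

-- hand port of Python's format(index, "b") for positive index: bits MSB-first
def pyBits (n : Nat) : List Bool :=
  if n = 0 then []
  else pyBits (n / 2) ++ [n % 2 == 1]

def fast_double_fib_alt (index : Int) : Int × Int :=
  if 0 < index then (pyBits index.toNat).foldl fdStep (0, 1)
  else (0, 1)

-- ===== PRECONDITION & SPEC =====
-- Pre_ excludes negative index, on which Python A raises RecursionError.
def Pre_fast_double_fib (index : Int) : Prop := 0 ≤ index
instance (index : Int) : Decidable (Pre_fast_double_fib index) := by unfold Pre_fast_double_fib; infer_instance
def pvWitness_fast_double_fib : Int := 13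

def Spec_fast_double_fib (index : Int) (out : Int × Int) : Prop := out = fast_double_fib_alt index
instance (index : Int) (out : Int × Int) : Decidable (Spec_fast_double_fib index out) := by unfold Spec_fast_double_fib; infer_instance

-- ===== CLAIM (what is proved, stated in full; the proofs are below) =====
def Claim_equal_fast_double_fib : Prop := ∀ (index : Int), Dom_fast_double_fib index → Pre_fast_double_fib index → Spec_fast_double_fib index (fast_double_fib index)

-- ===== LEMMAS AND PROOFS =====

-- A's conditional +MOD fixup before the multiply does not change the residue.
theorem fixup_mod (a b : Int) :
    PySem.Int.mod (a * (if 2 * b - a < 0 then 2 * b - a + 10000000 else 2 * b - a)) 10000000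
    = PySem.Int.mod (a * (2 * b - a)) 10000000 := by
  split_ifs with h
  · rw [PySem.Int.mod_eq_emod_of_pos (by norm_num),
        PySem.Int.mod_eq_emod_of_pos (by norm_num)]
    have : a * (2 * b - a + 10000000) = a * (2 * b - a) + 10000000 * a := by ring
    rw [this, Int.add_mul_emod_self_left]
  · rfl

theorem pyBits_pos (n : Nat) (h : n ≠ 0) : pyBits n = pyBits (n / 2) ++ [n % 2 == 1] := by
  rw [pyBits]; simp [h]

theorem key (n : Nat) : fast_double_fib (n : Int) = (pyBits n).foldl fdStep (0, 1) := by
  induction n using Nat.strong_induction_on with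
  | _ n ih =>
    by_cases h0 : n = 0
    · subst h0; simp [fast_double_fib, pyBits]
    · rw [pyBits_pos n h0, List.foldl_append]
      rw [fast_double_fib]
      have hne : (n : Int) ≠ 0 := by exact_mod_cast h0
      have hnn : ¬ (n : Int) < 0 := by omega
      have hdiv : PySem.Int.floordiv (n : Int) 2 = ((n / 2 : Nat) : Int) := by
        exact_mod_cast PySem.Int.floordiv_natCast n 2
      have hmod : PySem.Int.mod (n : Int) 2 = ((n % 2 : Nat) : Int) := by
        exact_mod_cast PySem.Int.mod_natCast n 2
      simp only [hne, hnn, if_false, dite_false, hdiv, hmod,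
        ih (n / 2) (Nat.div_lt_self (Nat.pos_of_ne_zero h0) (by norm_num))]
      simp only [List.foldl_cons, List.foldl_nil, fdStep, fixup_mod]
      rcases Nat.even_or_odd n with he | ho
      · have h2 : n % 2 = 0 := Nat.even_iff.mp he
        simp [h2]
      · have h2 : n % 2 = 1 := Nat.odd_iff.mp ho
        simp [h2]

-- ===== VERDICT (by name: the statement is the Claim_ definition above) =====
theorem fast_double_fib_spec : Claim_equal_fast_double_fib := by
  intro index _ hpre
  unfold Spec_fast_double_fib fast_double_fib_alt
  obtain ⟨n, rfl⟩ := Int.eq_ofNat_of_zero_le hpre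
  rw [key n]
  by_cases h0 : n = 0
  · subst h0; simp [pyBits]
  · have : (0:Int) < n := by exact_mod_cast Nat.pos_of_ne_zero h0
    rw [if_pos this]
    simp
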